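-- pv_equiv track=rewrite | github.com/TuGraph-family/miniGU | experiment/patterns/convert_sql2gql.py | _euler_walk_nodes_edges
-- ===== SOURCE A (Python) =====
-- from typing import Dict, Iterable, List, Optional, Set, Tuple
--
-- def _euler_walk_nodes_edges(node_aliases: Set[str], edge_endpoints: Dict[str, Tuple[str, str]]) -> Tuple[List[str], List[str]]:
--     """
--     Return (nodes_in_order, edges_in_order) where edges connect consecutive nodes.
--     Covers each edge alias once when possible.
--     """
--     # adjacency: node -> list of edge aliases
--     adj: Dict[str, List[str]] = {n: [] for n in node_aliases}
--     deg: Dict[str, int] = {n: 0 for n in node_aliases}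
--     for e, (u, v) in edge_endpoints.items():
--         if u not in adj or v not in adj:
--             continue
--         adj[u].append(e)
--         adj[v].append(e)
--         deg[u] += 1
--         deg[v] += 1
--
--     # pick start
--     odd = [n for n, d in deg.items() if d % 2 == 1 and d > 0]
--     if odd:
--         start = sorted(odd)[0]
--     else:
--         nonzero = [n for n, d in deg.items() if d > 0]
--         start = sorted(nonzero)[0] if nonzero else (sorted(node_aliases)[0] if node_aliases else "")
--
--     if not start:
--         return ([], [])
--
--     # Use stack of (node, incoming_edge) to build Euler circuit/trail.
--     used: Set[str] = set()
--     stack: List[Tuple[str, Optional[str]]] = [(start, None)]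
--     circuit: List[Tuple[str, Optional[str]]] = []
--
--     # Make adjacency deterministic
--     for n in adj:
--         adj[n].sort(reverse=True)
--
--     while stack:
--         v, inc = stack[-1]
--         while adj[v] and adj[v][-1] in used:
--             adj[v].pop()
--         if not adj[v]:
--             circuit.append(stack.pop())
--             continue
--         e = adj[v].pop()
--         if e in used:
--             continue
--         used.add(e)
--         u, w = edge_endpoints[e]
--         nxt = w if v == u else u
--         stack.append((nxt, e))
--
--     circuit.reverse()
--     nodes: List[str] = []
--     edges: List[str] = []
--     for i, (n, inc) in enumerate(circuit):
--         nodes.append(n)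
--         if i > 0 and inc:
--             edges.append(inc)
--     return nodes, edges
-- ===== SOURCE B (Python) =====
-- from typing import Dict, Iterator, List, Optional, Set, Tuple
--
-- def _euler_walk_nodes_edges(node_aliases: Set[str], edge_endpoints: Dict[str, Tuple[str, str]]) -> Tuple[List[str], List[str]]:
--     """Recursive Hierholzer: no deg dict, no circuit list and no enumerate pass -
--     degrees are read off the adjacency lists, min replaces sorted()[0], and each
--     visit(v, inc) call pops edges, recurses into the other endpoint, then emits
--     its node and incoming edge (in reverse order) as it returns.  visit is
--     written as a generator so the recursion is driven without hitting CPython's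
--     recursion limit on long trails."""
--     adj: Dict[str, List[str]] = {n: [] for n in node_aliases}
--     for e, (u, v) in edge_endpoints.items():
--         if u in adj and v in adj:
--             adj[u].append(e)
--             adj[v].append(e)
--
--     odd = [n for n, es in adj.items() if len(es) % 2 == 1]
--     if odd:
--         start = min(odd)
--     else:
--         nonzero = [n for n, es in adj.items() if es]
--         start = min(nonzero) if nonzero else (min(node_aliases) if node_aliases else "")
--     if not start:
--         return ([], [])
--
--     for n in adj:
--         adj[n].sort(reverse=True)
--
--     used: Set[str] = set()
--     nodes_rev: List[str] = []
--     edges_rev: List[str] = []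
--
--     def visit(v: str, inc: Optional[str]) -> Iterator:
--         while adj[v]:
--             e = adj[v].pop()
--             if e in used:
--                 continue
--             used.add(e)
--             u, w = edge_endpoints[e]
--             yield visit(w if v == u else u, e)   # recursive call
--         nodes_rev.append(v)
--         if inc:
--             edges_rev.append(inc)
--
--     # drive the recursion (a generator trampoline: no recursion-depth limit)
--     pending = [visit(start, None)]
--     while pending:
--         try:
--             pending.append(next(pending[-1]))
--         except StopIteration:
--             pending.pop()
--
--     nodes_rev.reverse()
--     edges_rev.reverse()
--     return nodes_rev, edges_rev
-- ===== Notes on version B (the rewrite author's own statement) =====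
-- stated objective: simpler
-- what changed: The explicit stack machine with its deg dict, circuit list and final enumerate pass is replaced by a recursive Hierholzer visit(v, inc) (run as a generator to avoid the recursion-depth limit) that pops edges, recurses into the other endpoint, and emits its node and incoming edge directly in postorder; degrees are read off adjacency-list lengths and min replaces sorted()[0] for start selection.
import Mathlib
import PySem

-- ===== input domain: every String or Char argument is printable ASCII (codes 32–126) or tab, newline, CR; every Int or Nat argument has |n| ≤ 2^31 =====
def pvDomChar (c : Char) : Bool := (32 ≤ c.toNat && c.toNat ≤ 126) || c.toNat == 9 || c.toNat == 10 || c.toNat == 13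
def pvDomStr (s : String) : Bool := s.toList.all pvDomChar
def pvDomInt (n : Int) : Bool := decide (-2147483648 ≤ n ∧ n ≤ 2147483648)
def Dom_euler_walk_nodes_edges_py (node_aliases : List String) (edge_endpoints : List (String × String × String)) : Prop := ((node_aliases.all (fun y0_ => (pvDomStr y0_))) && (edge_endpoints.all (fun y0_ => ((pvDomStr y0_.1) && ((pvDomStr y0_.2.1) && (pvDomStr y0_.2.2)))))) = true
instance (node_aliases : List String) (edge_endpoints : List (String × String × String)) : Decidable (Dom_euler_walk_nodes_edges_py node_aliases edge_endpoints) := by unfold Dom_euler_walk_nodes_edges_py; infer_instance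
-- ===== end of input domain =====

-- B replaces A's explicit stack machine by a recursive Hierholzer visit(v, inc) that skips
-- used edges lazily and emits its node and incoming edge directly in postorder; the deg dict,
-- the circuit list and the enumerate pass disappear, and min replaces sorted()[0].
-- Neither version mutates its caller's arguments. Equivalence is proved on all inputs.

-- ===== PORT A =====
-- total number of edge slots in the adjacency dict (the fuel bound for the walk recursions below)
def pvTotal (adj : PySem.Dict String (List String)) : Nat :=
  (adj.items.map (fun p => p.2.length)).sum

-- A's 'while adj[v] and adj[v][-1] in used: adj[v].pop()'.
-- pvCleanDrop drops the used prefix of the REVERSED list; popping from the end of l is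
-- exactly dropping from the front of l.reverse, so pvClean is that while loop, exactly.
def pvCleanDrop (used : PySem.Set String) : List String → List String
  | [] => []
  | e :: t => if PySem.Set.contains used e then pvCleanDrop used t else e :: t

def pvClean (l : List String) (used : PySem.Set String) : List String :=
  (pvCleanDrop used l.reverse).reverse

-- A's 'while stack:' loop; the fuel argument only makes the recursion structural
-- (2*pvTotal adj + stack.length strictly decreases each step; the callers supply enough fuel)
def pvALoop (ed : PySem.Dict String (String × String)) :
    Nat → List (String × Option String) → PySem.Dict String (List String) →
    PySem.Set String → List (String × Option String) → List (String × Option String)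
  | 0, _, _, _, circuit => circuit
  | _ + 1, [], _, _, circuit => circuit
  | fuel + 1, (v, inc) :: rest, adj, used, circuit =>
    let lv := pvClean (adj.getD v []) used
    if lv = [] then
      pvALoop ed fuel rest (adj.insert v lv) used (circuit ++ [(v, inc)])
    else
      let e := lv.getLastD ""
      let adj' := adj.insert v lv.dropLast
      if PySem.Set.contains used e then
        pvALoop ed fuel ((v, inc) :: rest) adj' used circuit
      else
        let uw := ed.getD e ("", "")   -- 'edge_endpoints[e]': e always is a key here, so getD is exact
        pvALoop ed fuel (((if v = uw.1 then uw.2 else uw.1), some e) :: (v, inc) :: rest)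
          adj' (PySem.Set.add used e) circuit

def euler_walk_nodes_edges_py (node_aliases : List String) (edge_endpoints : List (String × String × String)) : List String × List String :=
  let ed : PySem.Dict String (String × String) := PySem.Dict.ofList edge_endpoints
  let adj0 : PySem.Dict String (List String) :=
    node_aliases.foldl (fun d n => d.insert n []) PySem.Dict.empty
  let deg0 : PySem.Dict String Int :=
    node_aliases.foldl (fun d n => d.insert n 0) PySem.Dict.empty
  let ad := ed.items.foldl
    (fun (p : PySem.Dict String (List String) × PySem.Dict String Int) ev =>
      if !p.1.contains ev.2.1 || !p.1.contains ev.2.2 then p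
      else (((p.1.modify ev.2.1 [] (· ++ [ev.1])).modify ev.2.2 [] (· ++ [ev.1])),
            ((p.2.modify ev.2.1 0 (· + 1)).modify ev.2.2 0 (· + 1))))
    (adj0, deg0)
  let odd := (ad.2.items.filter (fun p => PySem.Int.mod p.2 2 == 1 && decide (0 < p.2))).map (fun p => p.1)
  let start :=
    if odd ≠ [] then (PySem.List.sorted odd (fun x => x) false).headD ""
    else
      let nonzero := (ad.2.items.filter (fun p => decide (0 < p.2))).map (fun p => p.1)
      if nonzero ≠ [] then (PySem.List.sorted nonzero (fun x => x) false).headD ""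
      else if node_aliases ≠ [] then
        -- sorted(node_aliases)[0] on the SET: order-independent, so sorted of the distinct elements
        (PySem.List.sorted (PySem.Set.ofList node_aliases) (fun x => x) false).headD ""
      else ""
  if start = "" then ([], [])
  else
    let adj2 := ad.1.keys.foldl
      (fun d n => d.modify n [] (fun l => PySem.List.sorted l (fun x => x) true)) ad.1
    let circuit := (pvALoop ed (2 * pvTotal adj2 + 1) [(start, none)] adj2 PySem.Set.empty []).reverse
    (PySem.List.enumerate circuit 0).foldl
      (fun (p : List String × List String) ie =>
        (p.1 ++ [ie.2.1],
         match ie.2.2 with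
         | some e => if 0 < ie.1 ∧ e ≠ "" then p.2 ++ [e] else p.2
         | none => p.2))
      ([], [])

-- ===== PORT B =====
-- B's recursive 'def visit(v, inc):' — 'while adj[v]: e = adj[v].pop(); if e in used: continue;
-- used.add(e); visit(...)' then 'nodes_rev.append(v); if inc: edges_rev.append(inc)'.
-- (Source B drives this recursion through a generator trampoline only to sidestep CPython's
-- recursion limit; the calls, their order and their effects are exactly this recursion.)
-- The state tuple is (adj, used, nodes_rev, edges_rev); the fuel argument only makes the
-- recursion structural (pvTotal strictly decreases along every call chain; callers supply enough).
def pvVisit (ed : PySem.Dict String (String × String)) :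
    Nat → String → Option String →
    PySem.Dict String (List String) × PySem.Set String × List String × List String →
    PySem.Dict String (List String) × PySem.Set String × List String × List String
  | 0, _, _, st => st
  | fuel + 1, v, inc, (adj, used, nodesRev, edgesRev) =>
    let lv := adj.getD v []   -- 'adj[v]': v always is a key here, so getD is exact
    if lv = [] then
      (adj, used, nodesRev ++ [v],
       match inc with   -- 'if inc:' — truthy = some nonempty string
       | some e => if e ≠ "" then edgesRev ++ [e] else edgesRev
       | none => edgesRev)
    else
      let e := lv.getLastD ""
      let adj1 := adj.insert v lv.dropLast
      if PySem.Set.contains used e then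
        pvVisit ed fuel v inc (adj1, used, nodesRev, edgesRev)
      else
        let uw := ed.getD e ("", "")   -- 'edge_endpoints[e]': e always is a key here, so getD is exact
        let st2 := pvVisit ed fuel (if v = uw.1 then uw.2 else uw.1) (some e)
          (adj1, PySem.Set.add used e, nodesRev, edgesRev)
        pvVisit ed fuel v inc st2

def euler_walk_nodes_edges_py_alt (node_aliases : List String) (edge_endpoints : List (String × String × String)) : List String × List String :=
  let ed : PySem.Dict String (String × String) := PySem.Dict.ofList edge_endpoints
  let adj0 : PySem.Dict String (List String) :=
    node_aliases.foldl (fun d n => d.insert n []) PySem.Dict.empty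
  let adj1 := ed.items.foldl
    (fun d ev =>
      if d.contains ev.2.1 && d.contains ev.2.2 then
        (d.modify ev.2.1 [] (· ++ [ev.1])).modify ev.2.2 [] (· ++ [ev.1])
      else d)
    adj0
  let odd := (adj1.items.filter (fun p => p.2.length % 2 == 1)).map (fun p => p.1)
  let start :=
    if odd ≠ [] then PySem.List.minD odd (fun x => x) ""
    else
      let nonzero := (adj1.items.filter (fun p => !p.2.isEmpty)).map (fun p => p.1)
      if nonzero ≠ [] then PySem.List.minD nonzero (fun x => x) ""
      else if node_aliases ≠ [] then
        -- min over the SET node_aliases: the min of its distinct elements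
        PySem.List.minD (PySem.Set.ofList node_aliases) (fun x => x) ""
      else ""
  if start = "" then ([], [])
  else
    let adj2 := adj1.keys.foldl
      (fun d n => d.modify n [] (fun l => PySem.List.sorted l (fun x => x) true)) adj1
    let r := pvVisit ed (pvTotal adj2 + 1) start none (adj2, PySem.Set.empty, [], [])
    (r.2.2.1.reverse, r.2.2.2.reverse)

-- ===== PRECONDITION & SPEC =====
def Spec_euler_walk_nodes_edges_py (node_aliases : List String) (edge_endpoints : List (String × String × String)) (out : List String × List String) : Prop := out = euler_walk_nodes_edges_py_alt node_aliases edge_endpoints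
instance (node_aliases : List String) (edge_endpoints : List (String × String × String)) (out : List String × List String) : Decidable (Spec_euler_walk_nodes_edges_py node_aliases edge_endpoints out) := by unfold Spec_euler_walk_nodes_edges_py; infer_instance

-- ===== CLAIM (what is proved, stated in full; the proofs are below) =====
def Claim_equal_euler_walk_nodes_edges_py : Prop := ∀ (node_aliases : List String) (edge_endpoints : List (String × String × String)), Dom_euler_walk_nodes_edges_py node_aliases edge_endpoints → Spec_euler_walk_nodes_edges_py node_aliases edge_endpoints (euler_walk_nodes_edges_py node_aliases edge_endpoints)

-- ===== LEMMAS AND PROOFS =====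

-- if the last element is not used, A's cleanup does nothing
theorem pvClean_of_last_not_used (l : List String) (used : PySem.Set String)
    (hne : l ≠ []) (h : PySem.Set.contains used (l.getLastD "") = false) :
    pvClean l used = l := by
  cases hr : l.reverse with
  | nil => exact absurd (by simpa using congrArg List.reverse hr) hne
  | cons a t =>
    have ha : l.getLastD "" = a := by
      have h1 : l.reverse.head? = some a := by rw [hr]; rfl
      rw [List.head?_reverse] at h1
      simp [List.getLastD_eq_getLast?, h1]
    have hca : PySem.Set.contains used a = false := by rw [← ha]; exact h
    have : pvCleanDrop used (a :: t) = a :: t := by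
      simp only [pvCleanDrop, hca]
      simp
    rw [pvClean, hr, this, ← hr, List.reverse_reverse]

-- if the last element is used, A's cleanup first drops it
theorem pvClean_of_last_used (l : List String) (used : PySem.Set String)
    (hne : l ≠ []) (h : PySem.Set.contains used (l.getLastD "") = true) :
    pvClean l used = pvClean l.dropLast used := by
  cases hr : l.reverse with
  | nil => exact absurd (by simpa using congrArg List.reverse hr) hne
  | cons a t =>
    have ha : l.getLastD "" = a := by
      have h1 : l.reverse.head? = some a := by rw [hr]; rfl
      rw [List.head?_reverse] at h1
      simp [List.getLastD_eq_getLast?, h1]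
    have ht : l.dropLast.reverse = t := by
      have := congrArg List.tail hr
      simpa [List.tail_reverse] using this
    rw [pvClean, hr, pvCleanDrop, if_pos (by rw [← ha]; exact h), pvClean, ht]

-- pvTotal arithmetic of insert, for a dict with no duplicate keys
theorem pvTotal_insert (adj : PySem.Dict String (List String)) (v : String) (l : List String)
    (h : adj.keys.Nodup) :
    pvTotal (adj.insert v l) + (adj.getD v []).length = pvTotal adj + l.length := by
  obtain ⟨its⟩ := adj
  revert h
  induction its with
  | nil =>
    intro _
    simp [pvTotal, PySem.Dict.insert, PySem.Dict.contains, PySem.Dict.getD, PySem.Dict.get?]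
  | cons p t ih =>
    intro h
    have hk : (p.1 :: t.map Prod.fst).Nodup := by
      simpa [PySem.Dict.keys] using h
    have ht : (PySem.Dict.mk t : PySem.Dict String (List String)).keys.Nodup := by
      simpa [PySem.Dict.keys] using (List.nodup_cons.mp hk).2
    by_cases hv : p.1 = v
    · have hnom : ∀ q ∈ t, (q.1 == v) = false := by
        intro q hq
        have hp : p.1 ∉ t.map Prod.fst := (List.nodup_cons.mp hk).1
        have hne : q.1 ≠ v := by
          intro hqv
          exact hp (by rw [hv, ← hqv]; exact List.mem_map_of_mem hq)
        simp [hne]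
      have hne : ∀ q ∈ t, ¬ q.1 = v := fun q hq h' => by simpa [h'] using hnom q hq
      have hsum : (List.map ((fun (p : String × List String) => p.2.length) ∘
            fun p => if p.1 = v then (v, l) else p) t).sum
          = (List.map (fun (p : String × List String) => p.2.length) t).sum := by
        congr 1
        exact List.map_congr_left (fun q hq => by simp [Function.comp, hne q hq])
      have hcont : (PySem.Dict.mk (p :: t) : PySem.Dict String (List String)).contains v = true := by
        simp [PySem.Dict.contains, hv]
      simp [PySem.Dict.insert, hcont, pvTotal, PySem.Dict.getD, PySem.Dict.get?, hv,
        List.find?]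
      rw [hsum]
      omega
    · have hcont : (PySem.Dict.mk (p :: t) : PySem.Dict String (List String)).contains v
          = (PySem.Dict.mk t : PySem.Dict String (List String)).contains v := by
        simp [PySem.Dict.contains, hv]
      have hb : (p.1 == v) = false := by simp [hv]
      have hgd : (PySem.Dict.mk (p :: t) : PySem.Dict String (List String)).getD v []
          = (PySem.Dict.mk t : PySem.Dict String (List String)).getD v [] := by
        simp [PySem.Dict.getD, PySem.Dict.get?, List.find?, hb]
      have hih := ih ht
      have hitems : ((PySem.Dict.mk (p :: t) : PySem.Dict String (List String)).insert v l).items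
          = p :: ((PySem.Dict.mk t : PySem.Dict String (List String)).insert v l).items := by
        by_cases hc : (PySem.Dict.mk t : PySem.Dict String (List String)).contains v = true
        · simp [PySem.Dict.insert, hcont, hc, hv]
        · simp [PySem.Dict.insert, hcont, hc]
      have h1 : pvTotal ((PySem.Dict.mk (p :: t) : PySem.Dict String (List String)).insert v l)
          = p.2.length + pvTotal ((PySem.Dict.mk t : PySem.Dict String (List String)).insert v l) := by
        simp [pvTotal, hitems]
      have h2 : pvTotal (PySem.Dict.mk (p :: t) : PySem.Dict String (List String))
          = p.2.length + pvTotal (PySem.Dict.mk t : PySem.Dict String (List String)) := by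
        simp [pvTotal]
      rw [h1, h2, hgd]
      omega

-- two dicts with the same item list are the same dict
theorem pvDict_ext {a b : PySem.Dict String (List String)} (h : a.items = b.items) : a = b := by
  obtain ⟨ia⟩ := a
  obtain ⟨ib⟩ := b
  rw [show ia = ib from h]

-- overwriting an overwrite is one overwrite
theorem pvInsert_insert_same (d : PySem.Dict String (List String)) (k : String)
    (x y : List String) : (d.insert k x).insert k y = d.insert k y := by
  apply pvDict_ext
  have hcx : (d.insert k x).contains k = true := PySem.Dict.contains_insert_self _ _ _
  rw [PySem.Dict.items_insert_of_contains _ y hcx]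
  by_cases hc : d.contains k = true
  · rw [PySem.Dict.items_insert_of_contains _ x hc, PySem.Dict.items_insert_of_contains _ y hc,
      List.map_map]
    apply List.map_congr_left
    intro p _
    by_cases hpk : (p.1 == k) = true <;> simp [Function.comp, hpk]
  · have hc' : d.contains k = false := by simpa using hc
    rw [PySem.Dict.items_insert_of_not_contains _ x hc',
      PySem.Dict.items_insert_of_not_contains _ y hc', List.map_append]
    have hid : d.items.map (fun p => if p.1 = k then (k, y) else p) = d.items := by
      apply (List.map_congr_left _).trans (List.map_id _)
      intro p hp
      have hpk : ¬ p.1 = k := by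
        intro hq
        have hmem : d.contains k = true := by
          simp only [PySem.Dict.contains, List.any_eq_true]
          exact ⟨p, hp, by simp [hq]⟩
        simp [hmem] at hc'
      simp [hpk]
    simp [hid]

-- nodup keys through the builder folds
theorem pvNodup_fold {β : Type} (step : PySem.Dict String (List String) → β → PySem.Dict String (List String))
    (hstep : ∀ d x, d.keys.Nodup → (step d x).keys.Nodup) :
    ∀ (l : List β) (d : PySem.Dict String (List String)), d.keys.Nodup →
      (l.foldl step d).keys.Nodup := by
  intro l
  induction l with
  | nil => intro d h; exact h
  | cons x t ih => intro x' h; exact ih _ (hstep x' x h)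

theorem pvNodup_keys_modify (d : PySem.Dict String (List String)) (k : String)
    (f : List String → List String) (h : d.keys.Nodup) : (d.modify k [] f).keys.Nodup := by
  simp only [PySem.Dict.modify]
  exact PySem.Dict.nodup_keys_insert _ _ _ h

-- the adjacency dicts A and B hold at aligned points agree as FUNCTIONS (same lookups, same
-- total); they may differ as item lists only by keys bound to [] that A's 'adj[v] = []'
-- rewrite re-adds and B leaves alone
def pvEq (a b : PySem.Dict String (List String)) : Prop :=
  (∀ k, a.getD k [] = b.getD k []) ∧ pvTotal a = pvTotal b

theorem pvEq_refl (a : PySem.Dict String (List String)) : pvEq a a := ⟨fun _ => rfl, rfl⟩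

theorem pvEq_insert {a b : PySem.Dict String (List String)} (h : pvEq a b)
    (ha : a.keys.Nodup) (hb : b.keys.Nodup) (k : String) (l : List String) :
    pvEq (a.insert k l) (b.insert k l) := by
  refine ⟨fun k' => ?_, ?_⟩
  · rw [PySem.Dict.getD_insert, PySem.Dict.getD_insert]
    by_cases hk : k' = k <;> simp [hk, h.1 k']
  · have h1 := pvTotal_insert a k l ha
    have h2 := pvTotal_insert b k l hb
    have h4 : (a.getD k []).length = (b.getD k []).length := by rw [h.1 k]
    have h3 := h.2
    omega

-- when the edge at the end of adj[v] is already used, A's next step just discards it: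
-- its cleanup sees through the pop B did
theorem pvALoop_skip_used (ed : PySem.Dict String (String × String))
    (f : Nat) (v : String) (inc : Option String) (rest : List (String × Option String))
    (adj : PySem.Dict String (List String)) (used : PySem.Set String)
    (c : List (String × Option String))
    (hne : adj.getD v [] ≠ [])
    (hu : PySem.Set.contains used ((adj.getD v []).getLastD "") = true) :
    pvALoop ed (f + 1) ((v, inc) :: rest) adj used c
      = pvALoop ed (f + 1) ((v, inc) :: rest) (adj.insert v (adj.getD v []).dropLast) used c := by
  have hgd : (adj.insert v (adj.getD v []).dropLast).getD v [] = (adj.getD v []).dropLast :=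
    PySem.Dict.getD_insert_self _ _ _ _
  have hcl : pvClean ((adj.insert v (adj.getD v []).dropLast).getD v []) used
      = pvClean (adj.getD v []) used := by
    rw [hgd, ← pvClean_of_last_used _ _ hne hu]
  simp only [pvALoop, hcl]
  by_cases hlv : pvClean (adj.getD v []) used = []
  · simp only [hlv, reduceIte, pvInsert_insert_same]
  · simp only [hlv, reduceIte, pvInsert_insert_same]

-- 'if inc:' on the incoming edge, as a list to append
def pvOptInc : Option String → List String
  | some e => if e ≠ "" then [e] else []
  | none => []

-- the edge A's output pass keeps from a circuit frame
def pvG : String × Option String → Option String := fun p =>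
  match p.2 with
  | some e => if e ≠ "" then some e else none
  | none => none

-- THE SIMULATION: one visit(v, inc) call of B performs exactly the segment of A's stack loop
-- that starts when (v, inc) is on top and ends when it is popped; D is the list of frames A
-- pops strictly inside that segment, in pop order.
theorem pvSim (ed : PySem.Dict String (String × String)) :
    ∀ (fB : Nat) (v : String) (inc : Option String) (adj : PySem.Dict String (List String))
      (used : PySem.Set String) (ns es : List String),
      adj.keys.Nodup → pvTotal adj + 1 ≤ fB →
      ∃ (D : List (String × Option String)) (adj' : PySem.Dict String (List String))
        (used' : PySem.Set String),
        pvVisit ed fB v inc (adj, used, ns, es)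
          = (adj', used', ns ++ D.map (fun p => p.1) ++ [v],
             es ++ D.filterMap pvG ++ pvOptInc inc)
        ∧ adj'.keys.Nodup ∧ pvTotal adj' ≤ pvTotal adj
        ∧ ∀ (fA : Nat) (rest : List (String × Option String))
            (c : List (String × Option String)) (adjA : PySem.Dict String (List String)),
            adjA.keys.Nodup → pvEq adjA adj →
            2 * pvTotal adj + rest.length + 1 ≤ fA →
            ∃ (fA' : Nat) (adjA' : PySem.Dict String (List String)),
              pvALoop ed fA ((v, inc) :: rest) adjA used c
                = pvALoop ed fA' rest adjA' used' (c ++ D ++ [(v, inc)])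
              ∧ adjA'.keys.Nodup ∧ pvEq adjA' adj'
              ∧ 2 * pvTotal adj' + rest.length ≤ fA' := by
  intro fB
  induction fB with
  | zero => intro v inc adj used ns es _ hf; omega
  | succ fB ih =>
    intro v inc adj used ns es hnd hf
    by_cases hlv : adj.getD v [] = []
    · -- finish: adj[v] is empty, the frame is popped
      refine ⟨[], adj, used, ?_, hnd, le_refl _, ?_⟩
      · simp only [pvVisit, hlv, reduceIte]
        cases inc with
        | none => simp [pvOptInc]
        | some e => by_cases he : e = "" <;> simp [pvOptInc, he]
      · intro fA rest c adjA hndA heq hfA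
        obtain ⟨fA'', rfl⟩ : ∃ k, fA = k + 1 := ⟨fA - 1, by omega⟩
        have hlvA : pvClean (adjA.getD v []) used = [] := by
          rw [heq.1 v, hlv]; rfl
        refine ⟨fA'', adjA.insert v [], ?_, PySem.Dict.nodup_keys_insert _ _ _ hndA, ?_, ?_⟩
        · simp only [pvALoop, hlvA, reduceIte]
          simp
        · have h1 := pvTotal_insert adjA v [] hndA
          have h2 : adjA.getD v [] = [] := by rw [heq.1 v, hlv]
          constructor
          · intro k
            rw [PySem.Dict.getD_insert]
            by_cases hk : k = v <;> simp [hk, hlv, heq.1 k]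
          · have h3 := heq.2
            rw [h2] at h1; simp at h1; omega
        · have h2 := heq.2; omega
    · have htot := pvTotal_insert adj v (adj.getD v []).dropLast hnd
      have hlvlen : (adj.getD v []).length ≠ 0 := by
        simpa [List.length_eq_zero_iff] using hlv
      have htot1 : pvTotal (adj.insert v (adj.getD v []).dropLast) + 1 = pvTotal adj := by
        have hlen : (adj.getD v []).dropLast.length = (adj.getD v []).length - 1 := by simp
        omega
      have hnd1 : (adj.insert v (adj.getD v []).dropLast).keys.Nodup :=
        PySem.Dict.nodup_keys_insert _ _ _ hnd
      by_cases hu : PySem.Set.contains used ((adj.getD v []).getLastD "") = true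
      · -- B pops a used edge and loops; A's cleanup discards the same edge without a step
        obtain ⟨D, adj', used', hvis, hnd', htot', hApart⟩ :=
          ih v inc (adj.insert v (adj.getD v []).dropLast) used ns es hnd1 (by omega)
        have hstep : pvVisit ed (fB + 1) v inc (adj, used, ns, es)
            = pvVisit ed fB v inc (adj.insert v (adj.getD v []).dropLast, used, ns, es) := by
          simp only [pvVisit]
          rw [if_neg hlv, if_pos hu]
        refine ⟨D, adj', used', by rw [hstep]; exact hvis, hnd', by omega, ?_⟩
        intro fA rest c adjA hndA heq hfA
        obtain ⟨fA'', rfl⟩ : ∃ k, fA = k + 1 := ⟨fA - 1, by omega⟩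
        have hgdA : adjA.getD v [] = adj.getD v [] := heq.1 v
        have hskip := pvALoop_skip_used ed fA'' v inc rest adjA used c
          (by rw [hgdA]; exact hlv) (by rw [hgdA]; exact hu)
        rw [hskip, hgdA]
        exact hApart (fA'' + 1) rest c (adjA.insert v (adj.getD v []).dropLast)
          (PySem.Dict.nodup_keys_insert _ _ _ hndA)
          (pvEq_insert heq hndA hnd v _) (by omega)
      · -- B pops a fresh edge, recurses into its other endpoint, then continues with v
        obtain ⟨D1, adj2, used2, hvis1, hnd2, htot2, hApart1⟩ :=
          ih (if v = (ed.getD ((adj.getD v []).getLastD "") ("", "")).1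
              then (ed.getD ((adj.getD v []).getLastD "") ("", "")).2
              else (ed.getD ((adj.getD v []).getLastD "") ("", "")).1)
            (some ((adj.getD v []).getLastD ""))
            (adj.insert v (adj.getD v []).dropLast)
            (PySem.Set.add used ((adj.getD v []).getLastD "")) ns es hnd1 (by omega)
        obtain ⟨D2, adj3, used3, hvis2, hnd3, htot3, hApart2⟩ :=
          ih v inc adj2 used2
            (ns ++ D1.map (fun p => p.1)
              ++ [if v = (ed.getD ((adj.getD v []).getLastD "") ("", "")).1
                  then (ed.getD ((adj.getD v []).getLastD "") ("", "")).2
                  else (ed.getD ((adj.getD v []).getLastD "") ("", "")).1])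
            (es ++ D1.filterMap pvG ++ pvOptInc (some ((adj.getD v []).getLastD "")))
            hnd2 (by omega)
        refine ⟨D1
            ++ [((if v = (ed.getD ((adj.getD v []).getLastD "") ("", "")).1
                  then (ed.getD ((adj.getD v []).getLastD "") ("", "")).2
                  else (ed.getD ((adj.getD v []).getLastD "") ("", "")).1),
                 some ((adj.getD v []).getLastD ""))]
            ++ D2, adj3, used3, ?_, hnd3, by omega, ?_⟩
        · have hstep : pvVisit ed (fB + 1) v inc (adj, used, ns, es)
              = pvVisit ed fB v inc
                  (pvVisit ed fB
                    (if v = (ed.getD ((adj.getD v []).getLastD "") ("", "")).1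
                     then (ed.getD ((adj.getD v []).getLastD "") ("", "")).2
                     else (ed.getD ((adj.getD v []).getLastD "") ("", "")).1)
                    (some ((adj.getD v []).getLastD ""))
                    (adj.insert v (adj.getD v []).dropLast,
                     PySem.Set.add used ((adj.getD v []).getLastD ""), ns, es)) := by
            simp only [pvVisit]
            rw [if_neg hlv, if_neg hu]
          rw [hstep, hvis1, hvis2]
          simp [pvG, pvOptInc, List.filterMap_append]
          by_cases he : (adj.getD v []).getLast?.getD "" = "" <;> simp [he]
        · intro fA rest c adjA hndA heq hfA
          obtain ⟨fA'', rfl⟩ : ∃ k, fA = k + 1 := ⟨fA - 1, by omega⟩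
          have hgdA : adjA.getD v [] = adj.getD v [] := heq.1 v
          have hclA : pvClean (adjA.getD v []) used = adj.getD v [] := by
            rw [hgdA]
            exact pvClean_of_last_not_used _ used hlv (by simpa using hu)
          have hstepA : pvALoop ed (fA'' + 1) ((v, inc) :: rest) adjA used c
              = pvALoop ed fA''
                  (((if v = (ed.getD ((adj.getD v []).getLastD "") ("", "")).1
                     then (ed.getD ((adj.getD v []).getLastD "") ("", "")).2
                     else (ed.getD ((adj.getD v []).getLastD "") ("", "")).1),
                    some ((adj.getD v []).getLastD "")) :: (v, inc) :: rest)
                  (adjA.insert v (adj.getD v []).dropLast)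
                  (PySem.Set.add used ((adj.getD v []).getLastD "")) c := by
            simp only [pvALoop, hclA]
            rw [if_neg hlv, if_neg hu]
          obtain ⟨fA2, adjA2, hloop1, hndA2, heq2, hfA2⟩ :=
            hApart1 fA'' ((v, inc) :: rest) c (adjA.insert v (adj.getD v []).dropLast)
              (PySem.Dict.nodup_keys_insert _ _ _ hndA)
              (pvEq_insert heq hndA hnd v _) (by simp; omega)
          obtain ⟨fA3, adjA3, hloop2, hndA3, heq3, hfA3⟩ :=
            hApart2 fA2 rest
              (c ++ D1
                ++ [((if v = (ed.getD ((adj.getD v []).getLastD "") ("", "")).1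
                      then (ed.getD ((adj.getD v []).getLastD "") ("", "")).2
                      else (ed.getD ((adj.getD v []).getLastD "") ("", "")).1),
                     some ((adj.getD v []).getLastD ""))])
              adjA2 hndA2 heq2 (by simp at hfA2 ⊢; omega)
          refine ⟨fA3, adjA3, ?_, hndA3, heq3, hfA3⟩
          rw [hstepA, hloop1, hloop2]
          simp

-- exhausted stack: the loop returns the circuit at any fuel
theorem pvALoop_nil (ed : PySem.Dict String (String × String)) (f : Nat)
    (adj : PySem.Dict String (List String)) (used : PySem.Set String)
    (c : List (String × Option String)) : pvALoop ed f [] adj used c = c := by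
  cases f <;> rfl

-- the head of sorted(xs) is min(xs)
theorem sorted_headD_eq_minD (xs : List String) (h : xs ≠ []) :
    (PySem.List.sorted xs (fun x => x) false).headD "" = PySem.List.minD xs (fun x => x) "" := by
  obtain ⟨m, hm⟩ : ∃ m, PySem.List.min? xs (fun x => x) = some m := by
    cases hmm : PySem.List.min? xs (fun x => x) with
    | none => exact absurd ((PySem.List.min?_eq_none_iff xs _).mp hmm) h
    | some m => exact ⟨m, rfl⟩
  cases hs : PySem.List.sorted xs (fun x => x) false with
  | nil => exact absurd ((PySem.List.sorted_eq_nil_iff xs _ false).mp hs) h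
  | cons a t =>
    have ha : a ∈ xs := (PySem.List.mem_sorted xs _ false a).mp (by rw [hs]; exact List.mem_cons_self)
    have h1 : a ≤ m := PySem.List.key_head_sorted_le xs (fun x => x) hs m (PySem.List.min?_mem hm)
    have h2 : m ≤ a := PySem.List.min?_isMin hm a ha
    simp [PySem.List.minD, hm, le_antisymm h1 h2]

-- A keeps (adjacency, degree) in a pair; B keeps only the adjacency.  pvRel says the degree
-- dict is exactly the lengths of the adjacency lists, item for item.
def pvRel (a : PySem.Dict String (List String)) (d : PySem.Dict String Int) : Prop :=
  d.items = a.items.map (fun p => (p.1, (p.2.length : Int)))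

theorem pvRel_contains (a : PySem.Dict String (List String)) (d : PySem.Dict String Int)
    (h : pvRel a d) (k : String) : d.contains k = a.contains k := by
  unfold pvRel at h
  simp only [PySem.Dict.contains, h, List.any_map]
  rfl

theorem pvRel_getD (a : PySem.Dict String (List String)) (d : PySem.Dict String Int)
    (h : pvRel a d) (k : String) : d.getD k 0 = ((a.getD k []).length : Int) := by
  unfold pvRel at h
  simp only [PySem.Dict.getD, PySem.Dict.get?, h, List.find?_map]
  cases hf : List.find? (fun p => p.1 == k) a.items with
  | none =>
    have : List.find? ((fun (p : String × Int) => p.1 == k) ∘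
        (fun (p : String × List String) => (p.1, (p.2.length : Int)))) a.items = none := by
      simpa [Function.comp] using hf
    simp [this]
  | some q =>
    have : List.find? ((fun (p : String × Int) => p.1 == k) ∘
        (fun (p : String × List String) => (p.1, (p.2.length : Int)))) a.items = some q := by
      simpa [Function.comp] using hf
    simp [this]

theorem pvRel_insert (a : PySem.Dict String (List String)) (d : PySem.Dict String Int)
    (h : pvRel a d) (k : String) (vl : List String) (vi : Int)
    (hv : vi = (vl.length : Int)) : pvRel (a.insert k vl) (d.insert k vi) := by
  have hcont : d.contains k = a.contains k := pvRel_contains a d h k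
  unfold pvRel at h ⊢
  by_cases hc : a.contains k = true
  · simp only [PySem.Dict.insert, hcont, hc, reduceIte, h, List.map_map]
    apply List.map_congr_left
    intro p hp
    by_cases hpk : (p.1 == k) = true <;> simp [Function.comp, hpk, hv]
  · simp only [Bool.not_eq_true] at hc
    simp [PySem.Dict.insert, hcont, hc, h, hv]

theorem pvRel_modify (a : PySem.Dict String (List String)) (d : PySem.Dict String Int)
    (h : pvRel a d) (k : String) (e : String) :
    pvRel (a.modify k [] (· ++ [e])) (d.modify k 0 (· + 1)) := by
  simp only [PySem.Dict.modify]
  exact pvRel_insert a d h k _ _ (by rw [pvRel_getD a d h k]; simp [List.length_append])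

theorem pvRel_init : ∀ (l : List String) (a : PySem.Dict String (List String))
    (d : PySem.Dict String Int), pvRel a d →
    pvRel (l.foldl (fun d n => d.insert n []) a) (l.foldl (fun d n => d.insert n 0) d) := by
  intro l
  induction l with
  | nil => intro a d h; exact h
  | cons n t ih =>
    intro a d h
    exact ih _ _ (pvRel_insert a d h n [] 0 (by simp))

-- A's pair fold over the edges versus B's adjacency-only fold: same adjacency, related degrees
theorem pvEdgeFold : ∀ (l : List (String × String × String))
    (a : PySem.Dict String (List String)) (d : PySem.Dict String Int), pvRel a d →
    (List.foldl (fun (p : PySem.Dict String (List String) × PySem.Dict String Int) ev =>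
        if !p.1.contains ev.2.1 || !p.1.contains ev.2.2 then p
        else (((p.1.modify ev.2.1 [] (· ++ [ev.1])).modify ev.2.2 [] (· ++ [ev.1])),
              ((p.2.modify ev.2.1 0 (· + 1)).modify ev.2.2 0 (· + 1)))) (a, d) l).1
      = List.foldl (fun d ev =>
          if d.contains ev.2.1 && d.contains ev.2.2 then
            (d.modify ev.2.1 [] (· ++ [ev.1])).modify ev.2.2 [] (· ++ [ev.1])
          else d) a l ∧
    pvRel (List.foldl (fun d ev =>
          if d.contains ev.2.1 && d.contains ev.2.2 then
            (d.modify ev.2.1 [] (· ++ [ev.1])).modify ev.2.2 [] (· ++ [ev.1])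
          else d) a l)
      (List.foldl (fun (p : PySem.Dict String (List String) × PySem.Dict String Int) ev =>
        if !p.1.contains ev.2.1 || !p.1.contains ev.2.2 then p
        else (((p.1.modify ev.2.1 [] (· ++ [ev.1])).modify ev.2.2 [] (· ++ [ev.1])),
              ((p.2.modify ev.2.1 0 (· + 1)).modify ev.2.2 0 (· + 1)))) (a, d) l).2 := by
  intro l
  induction l with
  | nil => intro a d h; exact ⟨rfl, h⟩
  | cons ev t ih =>
    intro a d h
    by_cases h1 : a.contains ev.2.1 = true
    · by_cases h2 : a.contains ev.2.2 = true
      · simp only [List.foldl_cons, h1, h2, Bool.not_true, Bool.false_or, Bool.and_self, reduceIte]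
        exact ih _ _ (pvRel_modify _ _ (pvRel_modify a d h ev.2.1 ev.1) ev.2.2 ev.1)
      · simp only [Bool.not_eq_true] at h2
        simp only [List.foldl_cons, h1, h2, Bool.not_true, Bool.not_false, Bool.or_true,
          Bool.and_false, reduceIte]
        exact ih _ _ h
    · simp only [Bool.not_eq_true] at h1
      simp only [List.foldl_cons, h1, Bool.not_false, Bool.true_or, Bool.false_and, reduceIte]
      exact ih _ _ h

-- the two odd-degree tests agree: d % 2 == 1 and d > 0 over the degree IS len % 2 == 1
theorem pvOdd_pred (m : Nat) :
    (PySem.Int.mod (m : Int) 2 == 1 && decide (0 < (m : Int))) = (m % 2 == 1) := by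
  have h1 : PySem.Int.mod (m : Int) 2 = ((m % 2 : Nat) : Int) := by
    exact_mod_cast PySem.Int.mod_natCast m 2
  rcases Nat.mod_two_eq_zero_or_one m with h | h
  · rw [h1, h]
    simp
  · rw [h1, h]
    simp
    omega

theorem pvOdd_eq (a : PySem.Dict String (List String)) (d : PySem.Dict String Int)
    (h : pvRel a d) :
    (d.items.filter (fun p => PySem.Int.mod p.2 2 == 1 && decide (0 < p.2))).map (fun p => p.1)
      = (a.items.filter (fun p => p.2.length % 2 == 1)).map (fun p => p.1) := by
  unfold pvRel at h
  rw [h, List.filter_map, List.map_map]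
  have : ∀ p ∈ a.items,
      ((fun (q : String × Int) => PySem.Int.mod q.2 2 == 1 && decide (0 < q.2)) ∘
        (fun (q : String × List String) => (q.1, (q.2.length : Int)))) p
      = (fun (q : String × List String) => q.2.length % 2 == 1) p := by
    intro p _
    exact pvOdd_pred p.2.length
  rw [List.filter_congr this]
  rfl

theorem pvNonzero_eq (a : PySem.Dict String (List String)) (d : PySem.Dict String Int)
    (h : pvRel a d) :
    (d.items.filter (fun p => decide (0 < p.2))).map (fun p => p.1)
      = (a.items.filter (fun p => !p.2.isEmpty)).map (fun p => p.1) := by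
  unfold pvRel at h
  rw [h, List.filter_map, List.map_map]
  have : ∀ p ∈ a.items,
      ((fun (q : String × Int) => decide (0 < q.2)) ∘
        (fun (q : String × List String) => (q.1, (q.2.length : Int)))) p
      = (fun (q : String × List String) => !q.2.isEmpty) p := by
    intro p _
    cases hp : p.2 <;> simp [hp, Function.comp]
  rw [List.filter_congr this]
  rfl

-- a set built from a nonempty list is nonempty
theorem pvSet_ofList_ne_nil (l : List String) (h : l ≠ []) : PySem.Set.ofList l ≠ [] := by
  cases l with
  | nil => exact absurd rfl h
  | cons x t =>
    intro hnil
    have : x ∈ PySem.Set.ofList (x :: t) := by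
      rw [PySem.Set.mem_ofList]
      exact List.mem_cons_self
    rw [hnil] at this
    exact absurd this (List.not_mem_nil)

-- A's enumerate loop over the reversed circuit produces the map / filterMap shape
theorem pvOutFold (l : List (String × Option String)) :
    ∀ (acc : List String × List String) (s : Int), 1 ≤ s →
    (PySem.List.enumerate l s).foldl
      (fun (p : List String × List String) ie =>
        (p.1 ++ [ie.2.1],
         match ie.2.2 with
         | some e => if 0 < ie.1 ∧ e ≠ "" then p.2 ++ [e] else p.2
         | none => p.2)) acc
      = (acc.1 ++ l.map (fun p => p.1), acc.2 ++ l.filterMap pvG) := by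
  induction l with
  | nil => intro acc s hs; simp [PySem.List.enumerate]
  | cons x t ih =>
    intro acc s hs
    obtain ⟨nm, oinc⟩ := x
    rw [PySem.List.enumerate_cons, List.foldl_cons]
    cases oinc with
    | none => rw [ih _ (s + 1) (by omega)]; simp [pvG]
    | some e =>
      by_cases he : e = ""
      · rw [ih _ (s + 1) (by omega)]
        simp [pvG, he]
      · have hcond : 0 < s ∧ e ≠ "" := ⟨by omega, he⟩
        rw [ih _ (s + 1) (by omega)]
        simp [pvG, he, hcond]

theorem pvOut (l : List (String × Option String)) :
    (PySem.List.enumerate l 0).foldl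
      (fun (p : List String × List String) ie =>
        (p.1 ++ [ie.2.1],
         match ie.2.2 with
         | some e => if 0 < ie.1 ∧ e ≠ "" then p.2 ++ [e] else p.2
         | none => p.2)) ([], [])
      = (l.map (fun p => p.1), (l.drop 1).filterMap pvG) := by
  cases l with
  | nil => simp [PySem.List.enumerate]
  | cons x t =>
    obtain ⟨nm, oinc⟩ := x
    rw [PySem.List.enumerate_cons, List.foldl_cons]
    cases oinc with
    | none =>
      simp only [zero_add]
      rw [pvOutFold t _ 1 (by omega)]
      simp
    | some e =>
      simp only [zero_add]
      rw [pvOutFold t _ 1 (by omega)]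
      simp

-- the three start-selection expressions agree site by site (sorted()[0] = min on nonempty lists)
theorem pvStart_eq (O NZ na : List String) :
    (if O ≠ [] then (PySem.List.sorted O (fun x => x) false).headD ""
     else if NZ ≠ [] then (PySem.List.sorted NZ (fun x => x) false).headD ""
     else if na ≠ [] then (PySem.List.sorted (PySem.Set.ofList na) (fun x => x) false).headD ""
     else "")
    = (if O ≠ [] then PySem.List.minD O (fun x => x) ""
       else if NZ ≠ [] then PySem.List.minD NZ (fun x => x) ""
       else if na ≠ [] then PySem.List.minD (PySem.Set.ofList na) (fun x => x) ""
       else "") := by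
  by_cases hO : O = []
  · simp only [hO]
    by_cases hNZ : NZ = []
    · simp only [hNZ]
      by_cases hna : na = []
      · simp [hna]
      · simp only [hna, ne_eq, not_false_eq_true, reduceIte]
        exact sorted_headD_eq_minD _ (pvSet_ofList_ne_nil na hna)
    · simp only [hNZ, ne_eq, not_false_eq_true, reduceIte]
      exact sorted_headD_eq_minD _ hNZ
  · simp only [hO, ne_eq, not_false_eq_true, reduceIte]
    exact sorted_headD_eq_minD _ hO

-- everything from the chosen start on: A's whole loop + output pass equals B's single visit
theorem pvTail (ed : PySem.Dict String (String × String))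
    (adj2 : PySem.Dict String (List String)) (start : String) (hnd : adj2.keys.Nodup) :
    (PySem.List.enumerate
        ((pvALoop ed (2 * pvTotal adj2 + 1) [(start, none)] adj2 PySem.Set.empty []).reverse) 0).foldl
      (fun (p : List String × List String) ie =>
        (p.1 ++ [ie.2.1],
         match ie.2.2 with
         | some e => if 0 < ie.1 ∧ e ≠ "" then p.2 ++ [e] else p.2
         | none => p.2)) ([], [])
      = ((pvVisit ed (pvTotal adj2 + 1) start none (adj2, PySem.Set.empty, [], [])).2.2.1.reverse,
         (pvVisit ed (pvTotal adj2 + 1) start none (adj2, PySem.Set.empty, [], [])).2.2.2.reverse) := by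
  obtain ⟨D, adj', used', hvis, _, _, hApart⟩ :=
    pvSim ed (pvTotal adj2 + 1) start none adj2 PySem.Set.empty [] [] hnd (le_refl _)
  obtain ⟨fA', adjA', hloop, _, _, _⟩ :=
    hApart (2 * pvTotal adj2 + 1) [] [] adj2 hnd (pvEq_refl adj2) (by simp)
  rw [hloop, pvALoop_nil, hvis]
  simp only [List.nil_append]
  rw [List.reverse_append, pvOut]
  simp [List.filterMap_reverse, pvG, pvOptInc]

-- ===== VERDICT (by name: the statement is the Claim_ definition above) =====
theorem euler_walk_nodes_edges_py_spec : Claim_equal_euler_walk_nodes_edges_py := by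
  unfold Claim_equal_euler_walk_nodes_edges_py
  intro na ee _
  unfold Spec_euler_walk_nodes_edges_py
  simp only [euler_walk_nodes_edges_py, euler_walk_nodes_edges_py_alt]
  have hrel0 : pvRel (na.foldl (fun d n => d.insert n []) PySem.Dict.empty)
      (na.foldl (fun d n => d.insert n 0) PySem.Dict.empty) :=
    pvRel_init na PySem.Dict.empty PySem.Dict.empty rfl
  have hef := pvEdgeFold (PySem.Dict.ofList ee).items _ _ hrel0
  rw [hef.1, pvOdd_eq _ _ hef.2, pvNonzero_eq _ _ hef.2, pvStart_eq]
  have hnodup0 : (na.foldl (fun d n => d.insert n ([] : List String)) PySem.Dict.empty).keys.Nodup :=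
    pvNodup_fold _ (fun d n hd => PySem.Dict.nodup_keys_insert d n [] hd) na PySem.Dict.empty
      (by simp [PySem.Dict.keys, PySem.Dict.empty])
  have hnodup1 : (List.foldl (fun d ev =>
      if d.contains ev.2.1 && d.contains ev.2.2 then
        (d.modify ev.2.1 [] (· ++ [ev.1])).modify ev.2.2 [] (· ++ [ev.1])
      else d)
      (na.foldl (fun d n => d.insert n []) PySem.Dict.empty)
      (PySem.Dict.ofList ee).items).keys.Nodup := by
    apply pvNodup_fold _ (fun d ev hd => ?_) _ _ hnodup0
    by_cases hc : (d.contains ev.2.1 && d.contains ev.2.2) = true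
    · rw [if_pos hc]
      exact pvNodup_keys_modify _ _ _ (pvNodup_keys_modify _ _ _ hd)
    · rw [if_neg hc]
      exact hd
  refine if_congr Iff.rfl rfl ?_
  apply pvTail
  exact pvNodup_fold _ (fun dd n hdd => pvNodup_keys_modify dd n _ hdd) _ _ hnodup1
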